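-- pv_equiv track=rewrite | github.com/rorgflag-lgtm/atlas | commands/finetune.py | _parse_finetune_corpus
-- ===== SOURCE A (Python) =====
-- def _parse_finetune_corpus(raw: str) -> list:
--     corpus  = []
--     current = []
--
--     for line in raw.splitlines():
--         line = line.strip()
--         if not line:
--             if current:
--                 corpus.append("\n".join(current))
--                 current = []
--         else:
--             current.append(line)
--
--     if current:
--         corpus.append("\n".join(current))
--
--     valid = [
--         bloc for bloc in corpus
--         if "input :" in bloc and "reply :" in bloc
--     ]
--     return valid
-- ===== SOURCE B (Python) =====
-- def _parse_finetune_corpus(raw: str) -> list: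
--     lines = [l.strip() for l in raw.splitlines()]
--     blocks = []
--     i, n = 0, len(lines)
--     while i < n:
--         if not lines[i]:
--             i += 1
--             continue
--         j = i
--         while j < n and lines[j]:
--             j += 1
--         blocks.append("\n".join(lines[i:j]))
--         i = j
--     return [b for b in blocks if "input :" in b and "reply :" in b]
-- ===== Notes on version B (the rewrite author's own statement) =====
-- stated objective: alternative
-- what changed: Replaces A's accumulator state machine with trailing flush by a grouping pass: strip all lines first, then repeatedly take each maximal run of non-empty lines as a block (span/dropWhile), then filter.
import Mathlib
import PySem

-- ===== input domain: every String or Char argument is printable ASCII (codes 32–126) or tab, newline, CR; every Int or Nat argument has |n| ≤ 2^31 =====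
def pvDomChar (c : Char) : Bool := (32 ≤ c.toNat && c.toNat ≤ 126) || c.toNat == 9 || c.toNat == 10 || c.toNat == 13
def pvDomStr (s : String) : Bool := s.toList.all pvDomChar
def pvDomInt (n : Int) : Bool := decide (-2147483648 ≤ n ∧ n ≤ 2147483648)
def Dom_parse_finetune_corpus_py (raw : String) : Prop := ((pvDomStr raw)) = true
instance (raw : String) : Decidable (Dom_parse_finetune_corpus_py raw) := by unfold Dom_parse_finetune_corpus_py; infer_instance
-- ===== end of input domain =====

-- B replaces A's accumulator state machine (with trailing flush) by a grouping pass over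
-- pre-stripped lines: each maximal run of non-empty lines becomes a block; alternative decomposition, same cost.


-- ===== PORT A =====
-- state machine: (corpus, current); strip each line inside the loop, flush on blank line and at the end
def pvStepA (st : List String × List String) (line : String) : List String × List String :=
  let line := PySem.Str.strip line
  if line = "" then
    (if st.2 = [] then st else (st.1 ++ [PySem.Str.join "\n" st.2], []))
  else (st.1, st.2 ++ [line])

def parse_finetune_corpus_py (raw : String) : List String :=
  let st := (PySem.Str.splitlines raw).foldl pvStepA ([], [])
  let corpus := if st.2 = [] then st.1 else st.1 ++ [PySem.Str.join "\n" st.2]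
  corpus.filter (fun bloc => PySem.Str.isIn "input :" bloc && PySem.Str.isIn "reply :" bloc)

-- ===== PORT B =====
-- grouping pass: maximal runs of non-empty (pre-stripped) lines become blocks
def pvGroupsB : List String → List String
  | [] => []
  | l :: ls =>
    if l = "" then pvGroupsB ls
    else PySem.Str.join "\n" (l :: ls.takeWhile (· ≠ "")) :: pvGroupsB (ls.dropWhile (· ≠ ""))
termination_by x => x.length
decreasing_by
  · simp
  · have := List.length_dropWhile_le (p := (· ≠ "")) (l := ls); simp at *; omega

def parse_finetune_corpus_py_alt (raw : String) : List String :=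
  let lines := (PySem.Str.splitlines raw).map PySem.Str.strip
  (pvGroupsB lines).filter (fun b => PySem.Str.isIn "input :" b && PySem.Str.isIn "reply :" b)

-- ===== PRECONDITION & SPEC =====
def Spec_parse_finetune_corpus_py (raw : String) (out : List String) : Prop := out = parse_finetune_corpus_py_alt raw
instance (raw : String) (out : List String) : Decidable (Spec_parse_finetune_corpus_py raw out) := by unfold Spec_parse_finetune_corpus_py; infer_instance

-- ===== CLAIM (what is proved, stated in full; the proofs are below) =====
def Claim_equal_parse_finetune_corpus_py : Prop := ∀ (raw : String), Dom_parse_finetune_corpus_py raw → Spec_parse_finetune_corpus_py raw (parse_finetune_corpus_py raw)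

-- ===== LEMMAS AND PROOFS =====

-- A's step on an already-stripped line
def pvStepA' (st : List String × List String) (line : String) : List String × List String :=
  if line = "" then
    (if st.2 = [] then st else (st.1 ++ [PySem.Str.join "\n" st.2], []))
  else (st.1, st.2 ++ [line])

-- the flush at the end of A's loop
def pvFlush (st : List String × List String) : List String :=
  if st.2 = [] then st.1 else st.1 ++ [PySem.Str.join "\n" st.2]

-- loop invariant: grouping continued from a pending current block
lemma pvGroupsB_pending (ls : List String) :
    ∀ c1 c2 : List String,
      pvFlush (ls.foldl pvStepA' (c1, c2)) =
        c1 ++ (if c2 = [] then pvGroupsB ls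
          else PySem.Str.join "\n" (c2 ++ ls.takeWhile (· ≠ "")) :: pvGroupsB (ls.dropWhile (· ≠ ""))) := by
  induction ls with
  | nil =>
    intro c1 c2
    simp [pvFlush, pvGroupsB]
    split_ifs <;> simp
  | cons l ls ih =>
    intro c1 c2
    by_cases hl : l = ""
    · subst hl
      by_cases hc : c2 = []
      · subst hc
        simpa [List.foldl_cons, pvStepA', pvGroupsB] using ih c1 []
      · have h2 := ih (c1 ++ [PySem.Str.join "\n" c2]) []
        simp [List.foldl_cons, pvStepA', hc, pvGroupsB] at h2 ⊢
        simp [h2]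
    · have h2 := ih c1 (c2 ++ [l])
      by_cases hc : c2 = []
      · subst hc
        simp [List.foldl_cons, pvStepA', hl, pvGroupsB] at h2 ⊢
        simp [h2]
      · simp [List.foldl_cons, pvStepA', hl, hc] at h2 ⊢
        simp [h2]

lemma pvGroupsB_eq (ls : List String) :
    pvFlush (ls.foldl pvStepA' ([], [])) = pvGroupsB ls := by
  simpa using pvGroupsB_pending ls [] []

-- ===== VERDICT (by name: the statement is the Claim_ definition above) =====
theorem parse_finetune_corpus_py_spec : Claim_equal_parse_finetune_corpus_py := by
  intro raw _
  have hfun : pvStepA = fun st line => pvStepA' st (PySem.Str.strip line) := by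
    funext st line
    simp [pvStepA, pvStepA']
  have h1 : (PySem.Str.splitlines raw).foldl pvStepA ([], [])
      = ((PySem.Str.splitlines raw).map PySem.Str.strip).foldl pvStepA' ([], []) := by
    rw [hfun, List.foldl_map]
  show (pvFlush ((PySem.Str.splitlines raw).foldl pvStepA ([], []))).filter
      (fun bloc => PySem.Str.isIn "input :" bloc && PySem.Str.isIn "reply :" bloc)
    = parse_finetune_corpus_py_alt raw
  simp only [h1, pvGroupsB_eq]
  rfl
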